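-- pv_equiv track=rewrite | github.com/Anastar12/MovieRecommender | online/postprocessor.py | _get_poster_filename
-- ===== SOURCE A (Python) =====
-- def _get_poster_filename(title: str, year: str = None) -> str:
--     """Генерация имени файла постера"""
--     if not title:
--         return 'placeholder.jpg'
--
--     clean_title = str(title).lower()
--     clean_title = ''.join(c if c.isalnum() or c == ' ' else '' for c in clean_title)
--     clean_title = clean_title.replace(' ', '_').strip('_')
--
--     while '__' in clean_title:
--         clean_title = clean_title.replace('__', '_')
--
--     if year and str(year) not in ['nan', 'None', '']:
--         year = str(year).replace('-', '–')
--         return f"{clean_title}_{year}.jpg"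
--
--     return f"{clean_title}.jpg"
-- ===== SOURCE B (Python) =====
-- def _get_poster_filename(title: str, year: str = None) -> str:
--     """Single stateful pass over the title instead of filter+replace+strip+collapse passes."""
--     if not title:
--         return 'placeholder.jpg'
--
--     out = []
--     for c in str(title).lower():
--         if c == ' ':
--             if out and out[-1] != '_':
--                 out.append('_')
--         elif c.isalnum():
--             out.append(c)
--     if out and out[-1] == '_':
--         out.pop()
--     stem = ''.join(out)
--
--     if year and str(year) not in ['nan', 'None', '']:
--         stem += '_' + str(year).replace('-', '–')
--     return stem + '.jpg'
-- ===== Notes on version B (the rewrite author's own statement) =====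
-- stated objective: alternative
-- what changed: Replaces A's multi-pass title cleaning (filter to alphanumerics/spaces, replace spaces by underscores, strip edge underscores, then a while-loop repeatedly collapsing doubled underscores via str.replace) by one stateful pass over the lowered title that appends a single underscore separator only between alphanumeric runs, plus one trailing-separator pop; the year guard logic is kept but restructured into a single suffix-building return.
import Mathlib
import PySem

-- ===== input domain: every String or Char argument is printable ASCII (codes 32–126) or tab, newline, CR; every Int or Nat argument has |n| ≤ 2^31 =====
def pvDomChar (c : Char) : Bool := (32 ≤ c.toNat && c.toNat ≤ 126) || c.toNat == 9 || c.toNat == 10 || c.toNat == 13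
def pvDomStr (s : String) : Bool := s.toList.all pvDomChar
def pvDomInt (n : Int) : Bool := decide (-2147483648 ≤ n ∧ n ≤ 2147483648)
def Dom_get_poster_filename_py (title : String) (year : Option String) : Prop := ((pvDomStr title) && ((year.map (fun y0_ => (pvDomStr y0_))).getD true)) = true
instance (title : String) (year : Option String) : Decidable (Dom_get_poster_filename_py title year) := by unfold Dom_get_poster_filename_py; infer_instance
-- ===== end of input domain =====

-- One honest line: B replaces A's filter/replace/strip/while-collapse multi-pass title cleaning by a
-- single stateful pass that inserts underscore separators only between alphanumeric runs (same value).

-- ===== PORT A =====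
-- Lemmas needed by port A's while-loop TERMINATION (cited in decreasing_by; all other proof
-- material is below the claim block): Chars.replace s "__" "_" equals the structural pvRep,
-- which shortens the string whenever "__" occurs in it.
def pvRep : List Char → List Char
  | a :: b :: t => if a = '_' ∧ b = '_' then '_' :: pvRep t else a :: pvRep (b :: t)
  | [a] => [a]
  | [] => []

theorem pvRep_go_nil (fuel : Nat) (acc : List Char) :
    PySem.Chars.replace.go ['_','_'] ['_'] fuel [] acc = acc.reverse := by
  cases fuel <;> simp [PySem.Chars.replace.go]

theorem pvRep_go (l : List Char) : ∀ (fuel : Nat) (acc : List Char), l.length ≤ fuel →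
    PySem.Chars.replace.go ['_','_'] ['_'] fuel l acc = acc.reverse ++ pvRep l := by
  induction l using pvRep.induct with
  | case1 a b t hab ih =>
    intro fuel acc h
    obtain ⟨rfl, rfl⟩ := hab
    cases fuel with
    | zero => simp at h
    | succ f =>
      have hpre : (['_','_'] : List Char).isPrefixOf ('_' :: '_' :: t) = true := by
        simp [List.isPrefixOf]
      have h2 : t.length ≤ f := by simp at h; omega
      simp only [PySem.Chars.replace.go, hpre, if_pos]
      rw [show (List.drop (['_','_'] : List Char).length ('_'::'_'::t)) = t from rfl,
          ih f (['_'].reverse ++ acc) h2]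
      simp [pvRep]
  | case2 a b t hab ih =>
    intro fuel acc h
    cases fuel with
    | zero => simp at h
    | succ f =>
      have hpre : (['_','_'] : List Char).isPrefixOf (a :: b :: t) = false := by
        simp only [List.isPrefixOf, Bool.and_eq_false_iff, beq_eq_false_iff_ne, ne_eq]
        by_cases ha : a = '_'
        · by_cases hb : b = '_'
          · exact absurd ⟨ha, hb⟩ hab
          · exact Or.inr (Or.inl (fun h' => hb h'.symm))
        · exact Or.inl (fun h' => ha h'.symm)
      have h2 : (b :: t).length ≤ f := by simp at h ⊢; omega
      simp only [PySem.Chars.replace.go, hpre, Bool.false_eq_true, if_false]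
      rw [ih f (a :: acc) h2]
      simp [pvRep, hab]
  | case3 a =>
    intro fuel acc h
    cases fuel with
    | zero => simp at h
    | succ f =>
      have hpre : (['_','_'] : List Char).isPrefixOf [a] = false := by
        simp [List.isPrefixOf]
      simp only [PySem.Chars.replace.go, hpre, Bool.false_eq_true, if_false]
      rw [pvRep_go_nil]
      simp [pvRep]
  | case4 =>
    intro fuel acc h
    rw [pvRep_go_nil]; simp [pvRep]

theorem replace_uu (s : List Char) :
    PySem.Chars.replace s ['_','_'] ['_'] = pvRep s := by
  have := pvRep_go s s.length [] (le_refl _)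
  simpa [PySem.Chars.replace] using this

theorem pvRep_length_le (l : List Char) : (pvRep l).length ≤ l.length := by
  induction l using pvRep.induct with
  | case1 a b t hab ih => obtain ⟨rfl, rfl⟩ := hab; simp [pvRep]; omega
  | case2 a b t hab ih => simp [pvRep, hab] at ih ⊢; omega
  | case3 a => simp [pvRep]
  | case4 => simp [pvRep]

theorem pvRep_length_lt (l : List Char) (h : (['_','_'] : List Char) <:+: l) :
    (pvRep l).length < l.length := by
  induction l using pvRep.induct with
  | case1 a b t hab ih =>
    obtain ⟨rfl, rfl⟩ := hab
    have := pvRep_length_le t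
    simp [pvRep]; omega
  | case2 a b t hab ih =>
    have h' : (['_','_'] : List Char) <:+: (b :: t) := by
      rcases (List.infix_cons_iff).mp h with hp | hi
      · rcases hp with ⟨s, hs⟩
        simp at hs
        exact absurd ⟨hs.1.symm, hs.2.1.symm⟩ hab
      · exact hi
    have := ih h'
    simp [pvRep, hab] at this ⊢
    omega
  | case3 a =>
    have := h.length_le
    simp at this
  | case4 =>
    have := h.length_le
    simp at this

theorem pvReplace_length_lt (s : List Char) (h : PySem.Chars.isIn ['_','_'] s = true) :
    (PySem.Chars.replace s ['_','_'] ['_']).length < s.length := by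
  rw [replace_uu]
  exact pvRep_length_lt s ((PySem.Chars.isIn_iff_infix _ _).mp h)

-- the 'while "__" in clean_title: clean_title = clean_title.replace("__","_")' loop, verbatim
def pvCollapseA (s : List Char) : List Char :=
  if h : PySem.Chars.isIn ['_','_'] s = true then
    pvCollapseA (PySem.Chars.replace s ['_','_'] ['_'])
  else s
termination_by s.length
decreasing_by exact pvReplace_length_lt s h

-- A's title-cleaning lines, step for step (lower; keep alnum/space; spaces → '_'; strip '_'; collapse '__')
def pvCleanA (t : List Char) : List Char :=
  let c1 := PySem.Chars.lower t
  let c2 := PySem.Chars.join [] (c1.map (fun c => if PySem.Chars.isalnum c || c == ' ' then [c] else []))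
  let c3 := PySem.Chars.replace c2 [' '] ['_']
  pvCollapseA (PySem.Chars.stripChars c3 ['_'])

-- literal transliteration of A (Python _get_poster_filename), on .toList via the PySem.Chars primitives
def get_poster_filename_py (title : String) (year : Option String) : String :=
  if title.toList = [] then "placeholder.jpg"
  else
    let clean := pvCleanA title.toList
    match year with
    | some y =>
      if y.toList ≠ [] ∧ y ∉ (["nan", "None", ""] : List String) then
        String.ofList (clean ++ '_' :: (PySem.Chars.replace y.toList ['-'] ['–']) ++ ".jpg".toList)
      else String.ofList (clean ++ ".jpg".toList)
    | none => String.ofList (clean ++ ".jpg".toList)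

-- ===== PORT B =====
-- B's cleaning loop: one fold over the lowered title ('for c in title.lower(): ...')
def pvOutB (t : List Char) : List Char :=
  (PySem.Chars.lower t).foldl (fun out c =>
    if c == ' ' then (if out ≠ [] ∧ out.getLast? ≠ some '_' then out ++ ['_'] else out)
    else if PySem.Chars.isalnum c then out ++ [c] else out) ([] : List Char)

-- 'if out and out[-1] == "_": out.pop()'
def pvStemB (t : List Char) : List Char :=
  if (pvOutB t).getLast? = some '_' then (pvOutB t).dropLast else pvOutB t

-- literal transliteration of B (Source B)
def get_poster_filename_py_alt (title : String) (year : Option String) : String :=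
  if title.toList = [] then "placeholder.jpg"
  else
    let stem := pvStemB title.toList
    let stem := match year with
      | some y =>
        if y.toList ≠ [] ∧ y ∉ (["nan", "None", ""] : List String) then
          stem ++ '_' :: PySem.Chars.replace y.toList ['-'] ['–']
        else stem
      | none => stem
    String.ofList (stem ++ ".jpg".toList)

-- ===== PRECONDITION & SPEC =====
def Spec_get_poster_filename_py (title : String) (year : Option String) (out : String) : Prop := out = get_poster_filename_py_alt title year
instance (title : String) (year : Option String) (out : String) : Decidable (Spec_get_poster_filename_py title year out) := by unfold Spec_get_poster_filename_py; infer_instance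

-- ===== CLAIM (what is proved, stated in full; the proofs are below) =====
def Claim_equal_get_poster_filename_py : Prop := ∀ (title : String) (year : Option String), Dom_get_poster_filename_py title year → Spec_get_poster_filename_py title year (get_poster_filename_py title year)

-- ===== LEMMAS AND PROOFS =====

def pvP (c : Char) : Bool := PySem.Chars.isalnum c || c == ' '
def pvQ (c : Char) : Bool := (['_'] : List Char).contains c

-- fully collapse '_' runs (right-fold form)
def pvSq : List Char → List Char
  | [] => []
  | c :: t => if c = '_' ∧ (pvSq t).head? = some '_' then pvSq t else c :: pvSq t

-- remove a trailing '_' run (head-recursive form of rstrip('_'))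
def pvRs : List Char → List Char
  | [] => []
  | c :: t => if c = '_' ∧ pvRs t = [] then [] else c :: pvRs t

def pvPopIf (y : List Char) : List Char := if y.getLast? = some '_' then y.dropLast else y

def pvSstep (out : List Char) (d : Char) : List Char :=
  if d = '_' then (if out ≠ [] ∧ out.getLast? ≠ some '_' then out ++ ['_'] else out) else out ++ [d]

theorem pvJoin_flatten (parts : List (List Char)) :
    PySem.Chars.join [] parts = parts.flatten := by
  induction parts with
  | nil => rfl
  | cons x ps ih =>
    cases ps with
    | nil => simp [PySem.Chars.join, List.intercalate, List.intersperse]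
    | cons y ps' =>
      simp only [PySem.Chars.join, List.intercalate, List.intersperse] at ih ⊢
      simp [ih]

theorem pvJoin_filter (l : List Char) :
    PySem.Chars.join [] (l.map (fun c => if PySem.Chars.isalnum c || c == ' ' then [c] else [])) = l.filter pvP := by
  rw [pvJoin_flatten]
  induction l with
  | nil => rfl
  | cons c t ih =>
    rw [List.map_cons, List.flatten_cons, ih, List.filter_cons]
    rw [show (if (PySem.Chars.isalnum c || c == ' ') = true then [c] else ([] : List Char))
          = if pvP c = true then [c] else [] from rfl]
    by_cases h : pvP c = true
    · rw [if_pos h, if_pos h]; rfl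
    · rw [if_neg h, if_neg h]; rfl

theorem pvReplace_go_nil (old new : List Char) (fuel : Nat) (acc : List Char) :
    PySem.Chars.replace.go old new fuel [] acc = acc.reverse := by
  cases fuel <;> simp [PySem.Chars.replace.go]

theorem pvReplace_single_go (a b : Char) (l : List Char) :
    ∀ (fuel : Nat) (acc : List Char), l.length ≤ fuel →
    PySem.Chars.replace.go [a] [b] fuel l acc = acc.reverse ++ l.map (fun c => if c = a then b else c) := by
  induction l with
  | nil => intro fuel acc h; rw [pvReplace_go_nil]; simp
  | cons c t ih =>
    intro fuel acc h
    cases fuel with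
    | zero => simp at h
    | succ f =>
      have h2 : t.length ≤ f := by simp at h; omega
      by_cases hac : a = c
      · subst hac
        have hpre : ([a] : List Char).isPrefixOf (a :: t) = true := by simp [List.isPrefixOf]
        simp only [PySem.Chars.replace.go, hpre, if_pos]
        rw [show (List.drop ([a] : List Char).length (a :: t)) = t from rfl, ih f ([b].reverse ++ acc) h2]
        simp
      · have hpre : ([a] : List Char).isPrefixOf (c :: t) = false := by
          simp only [List.isPrefixOf, Bool.and_eq_false_iff, beq_eq_false_iff_ne, ne_eq]
          exact Or.inl hac
        simp only [PySem.Chars.replace.go, hpre, Bool.false_eq_true, if_false]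
        rw [ih f (c :: acc) h2, List.map_cons, if_neg (fun h' => hac h'.symm)]
        simp

theorem pvReplace_single (s : List Char) (a b : Char) :
    PySem.Chars.replace s [a] [b] = s.map (fun c => if c = a then b else c) := by
  have := pvReplace_single_go a b s s.length [] (le_refl _)
  simpa [PySem.Chars.replace] using this

theorem pvQ_iff (c : Char) : pvQ c = true ↔ c = '_' := by
  show (['_'] : List Char).contains c = true ↔ c = '_'
  simp

theorem pvQ_underscore : pvQ '_' = true := by rw [pvQ_iff]

theorem pvQ_false {c : Char} (h : c ≠ '_') : pvQ c = false := by
  rw [← Bool.not_eq_true, pvQ_iff]; exact h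

theorem pvRs_spec (x : List Char) :
    (List.dropWhile pvQ x.reverse).reverse = pvRs x := by
  induction x with
  | nil => rfl
  | cons c t ih =>
    rw [show (c :: t).reverse = t.reverse ++ [c] from by simp, List.dropWhile_append]
    by_cases hE : (List.dropWhile pvQ t.reverse) = []
    · have hRs : pvRs t = [] := by rw [← ih, hE]; rfl
      simp only [hE, List.isEmpty_nil, if_pos]
      by_cases hc : c = '_'
      · subst hc
        simp [List.dropWhile, pvQ_underscore, pvRs, hRs]
      · simp [List.dropWhile, pvQ_false hc, pvRs, hc, hRs]
    · have hRs : pvRs t ≠ [] := by rw [← ih]; simpa using hE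
      rw [if_neg (by simpa using hE)]
      rw [show pvRs (c :: t) = c :: pvRs t from by rw [pvRs, if_neg (fun hx => hRs hx.2)]]
      simp [ih]

theorem pvStrip_eq (s : List Char) :
    PySem.Chars.stripChars s ['_'] = pvRs (List.dropWhile pvQ s) := by
  exact pvRs_spec (List.dropWhile pvQ s)

theorem pvSq_head (t : List Char) : (pvSq t).head? = t.head? := by
  cases t with
  | nil => rfl
  | cons c t' =>
    rw [pvSq]
    by_cases h : c = '_' ∧ (pvSq t').head? = some '_'
    · rw [if_pos h, h.2, h.1]; rfl
    · rw [if_neg h]; rfl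

theorem pvSq_nil_iff (t : List Char) : pvSq t = [] ↔ t = [] := by
  cases t with
  | nil => simp [pvSq]
  | cons c t' =>
    rw [pvSq]
    constructor
    · intro h
      by_cases hc : c = '_' ∧ (pvSq t').head? = some '_'
      · rw [if_pos hc] at h; rw [h] at hc; simp at hc
      · rw [if_neg hc] at h; simp at h
    · intro h; simp at h

theorem pvSq_cons_of_eq (c : Char) {x y : List Char} (h : pvSq x = pvSq y) :
    pvSq (c :: x) = pvSq (c :: y) := by
  rw [pvSq, pvSq, h]

theorem pvSq_uu (t : List Char) : pvSq ('_' :: '_' :: t) = pvSq ('_' :: t) := by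
  conv_lhs => rw [pvSq]
  rw [if_pos ⟨rfl, by rw [pvSq_head]; rfl⟩]

theorem pvSq_rep (s : List Char) : pvSq (pvRep s) = pvSq s := by
  induction s using pvRep.induct with
  | case1 a b t hab ih =>
    obtain ⟨rfl, rfl⟩ := hab
    rw [show pvRep ('_'::'_'::t) = '_' :: pvRep t from by rw [pvRep, if_pos ⟨rfl, rfl⟩]]
    rw [pvSq_uu]
    exact pvSq_cons_of_eq '_' ih
  | case2 a b t hab ih =>
    rw [show pvRep (a::b::t) = a :: pvRep (b::t) from by rw [pvRep, if_neg hab]]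
    exact pvSq_cons_of_eq a ih
  | case3 a => rfl
  | case4 => rfl

theorem pvSq_no_uu (s : List Char) (h : ¬ (['_','_'] : List Char) <:+: s) : pvSq s = s := by
  induction s with
  | nil => rfl
  | cons c t ih =>
    have ht : ¬ (['_','_'] : List Char) <:+: t := fun h' => h ((List.infix_cons_iff).mpr (Or.inr h'))
    rw [pvSq, ih ht]
    by_cases hc : c = '_' ∧ t.head? = some '_'
    · exfalso
      obtain ⟨rfl, hh⟩ := hc
      cases t with
      | nil => simp at hh
      | cons d t' =>
        simp at hh
        subst hh
        exact h (List.IsPrefix.isInfix ⟨t', rfl⟩)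
    · rw [if_neg hc]

theorem pvCollapseA_eq_sq (s : List Char) : pvCollapseA s = pvSq s := by
  induction s using pvCollapseA.induct with
  | case1 s h ih =>
    rw [pvCollapseA, dif_pos h, ih, replace_uu, pvSq_rep]
  | case2 s h =>
    rw [pvCollapseA, dif_neg h]
    exact (pvSq_no_uu s ((PySem.Chars.isIn_eq_false_iff _ _).mp (Bool.not_eq_true _ ▸ (Bool.eq_false_iff.mpr h)))).symm

theorem pvSq_cons_ne (c : Char) (t : List Char) (hc : c ≠ '_') : pvSq (c :: t) = c :: pvSq t := by
  rw [pvSq, if_neg (fun hx => hc hx.1)]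

theorem pvSq_cons_drop (r : List Char) :
    pvSq ('_' :: r) = '_' :: pvSq (List.dropWhile pvQ r) := by
  induction r with
  | nil => simp [pvSq]
  | cons d r' ih =>
    by_cases hd : d = '_'
    · subst hd
      rw [pvSq_uu, ih]
      simp [List.dropWhile, pvQ_underscore]
    · rw [show List.dropWhile pvQ (d :: r') = d :: r' from by simp [List.dropWhile, pvQ_false hd]]
      rw [pvSq, if_neg]
      rintro ⟨-, hh⟩
      rw [pvSq_head] at hh
      simp at hh
      exact hd hh

theorem pvFold23 (s : List Char) : ∀ out : List Char, out ≠ [] →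
    List.foldl pvSstep out s =
      out ++ (if out.getLast? = some '_' then pvSq (List.dropWhile pvQ s) else pvSq s) := by
  induction s with
  | nil => intro out hout; split_ifs <;> simp [pvSq]
  | cons d r ih =>
    intro out hout
    rw [List.foldl_cons]
    by_cases hd : d = '_'
    · subst hd
      by_cases hlast : out.getLast? = some '_'
      · rw [show pvSstep out '_' = out from by
          rw [pvSstep, if_pos rfl, if_neg (by rintro ⟨-, h2⟩; exact h2 hlast)]]
        rw [ih out hout, if_pos hlast, if_pos hlast]
        simp [List.dropWhile, pvQ_underscore]
      · rw [show pvSstep out '_' = out ++ ['_'] from by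
          rw [pvSstep, if_pos rfl, if_pos ⟨hout, hlast⟩]]
        rw [ih (out ++ ['_']) (by simp), if_pos (by simp), if_neg hlast]
        rw [pvSq_cons_drop, List.append_assoc]
        rfl
    · rw [show pvSstep out d = out ++ [d] from by rw [pvSstep, if_neg hd]]
      rw [ih (out ++ [d]) (by simp), if_neg (by simp [hd])]
      rw [show List.dropWhile pvQ (d :: r) = d :: r from by simp [List.dropWhile, pvQ_false hd]]
      rw [pvSq_cons_ne d r hd]
      split_ifs <;> simp [List.append_assoc]

theorem pvFold1 (s : List Char) :
    List.foldl pvSstep [] s = pvSq (List.dropWhile pvQ s) := by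
  induction s with
  | nil => rfl
  | cons d r ih =>
    rw [List.foldl_cons]
    by_cases hd : d = '_'
    · subst hd
      rw [show pvSstep [] '_' = [] from by rw [pvSstep, if_pos rfl, if_neg (by rintro ⟨h1, -⟩; exact h1 rfl)]]
      rw [ih]
      simp [List.dropWhile, pvQ_underscore]
    · rw [show pvSstep [] d = [d] from by rw [pvSstep, if_neg hd]; rfl]
      rw [pvFold23 r [d] (by simp), if_neg (by simp [hd])]
      rw [show List.dropWhile pvQ (d :: r) = d :: r from by simp [List.dropWhile, pvQ_false hd]]
      rw [pvSq_cons_ne d r hd]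
      rfl

theorem pvAlnum_ne_underscore {c : Char} (h : PySem.Chars.isalnum c = true) : c ≠ '_' := by
  intro hc
  rw [hc] at h
  exact absurd h (by decide)

theorem pvBfold (l : List Char) : ∀ out : List Char,
    l.foldl (fun out c =>
      if c == ' ' then (if out ≠ [] ∧ out.getLast? ≠ some '_' then out ++ ['_'] else out)
      else if PySem.Chars.isalnum c then out ++ [c] else out) out
    = List.foldl pvSstep out ((l.filter pvP).map (fun c => if c = ' ' then '_' else c)) := by
  induction l with
  | nil => intro out; rfl
  | cons c t ih =>
    intro out
    rw [List.foldl_cons]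
    by_cases hc : c = ' '
    · subst hc
      rw [show List.filter pvP (' ' :: t) = ' ' :: List.filter pvP t from by
        rw [List.filter_cons, if_pos (by decide)]]
      rw [List.map_cons, if_pos rfl, List.foldl_cons]
      have hacc : (if (' ' == ' ') = true then (if out ≠ [] ∧ out.getLast? ≠ some '_' then out ++ ['_'] else out)
          else if PySem.Chars.isalnum ' ' = true then out ++ [' '] else out) = pvSstep out '_' := rfl
      rw [hacc]
      exact ih _
    · have hbeq : (c == ' ') = false := by simpa using hc
      rw [hbeq]
      simp only [Bool.false_eq_true, if_false]
      by_cases ha : PySem.Chars.isalnum c = true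
      · have hkeep : pvP c = true := by simp [pvP, ha]
        rw [show List.filter pvP (c :: t) = c :: List.filter pvP t from by
          rw [List.filter_cons, if_pos hkeep]]
        rw [List.map_cons, if_neg hc, List.foldl_cons]
        rw [ha]
        simp only [if_true]
        rw [show pvSstep out c = out ++ [c] from by rw [pvSstep, if_neg (pvAlnum_ne_underscore ha)]]
        exact ih _
      · have ha' : PySem.Chars.isalnum c = false := by simpa using ha
        have hdrop : pvP c = false := by simp [pvP, ha', hbeq]
        rw [show List.filter pvP (c :: t) = List.filter pvP t from by
          rw [List.filter_cons, hdrop]; simp]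
        rw [ha']
        simp only [Bool.false_eq_true, if_false]
        exact ih out

theorem pvRs_nil_head (t : List Char) (ht : t ≠ []) (h : pvRs t = []) : t.head? = some '_' := by
  cases t with
  | nil => contradiction
  | cons c r =>
    by_cases hcr : c = '_' ∧ pvRs r = []
    · rw [hcr.1]; rfl
    · rw [pvRs, if_neg hcr] at h; simp at h

theorem pvRs_head (t : List Char) (h : pvRs t ≠ []) : (pvRs t).head? = t.head? := by
  cases t with
  | nil => rfl
  | cons c r =>
    by_cases hcr : c = '_' ∧ pvRs r = []
    · rw [pvRs, if_pos hcr] at h; contradiction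
    · rw [pvRs, if_neg hcr]; rfl

theorem pvPopIf_cons (c : Char) {S : List Char} (h : S ≠ []) :
    pvPopIf (c :: S) = c :: pvPopIf S := by
  obtain ⟨d, S', rfl⟩ := List.exists_cons_of_ne_nil h
  rw [pvPopIf, pvPopIf, List.getLast?_cons_cons]
  split_ifs with hl
  · rfl
  · rfl

theorem pvPop_sq (x : List Char) : pvPopIf (pvSq x) = pvSq (pvRs x) := by
  induction x with
  | nil => rfl
  | cons c t ih =>
    by_cases hcol : c = '_' ∧ (pvSq t).head? = some '_'
    · obtain ⟨rfl, hh⟩ := hcol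
      rw [show pvSq ('_'::t) = pvSq t from by rw [pvSq, if_pos ⟨rfl, hh⟩]]
      by_cases hR : pvRs t = []
      · rw [show pvRs ('_'::t) = [] from by rw [pvRs, if_pos ⟨rfl, hR⟩]]
        rw [ih, hR]
      · rw [show pvRs ('_'::t) = '_' :: pvRs t from by rw [pvRs, if_neg (fun hx => hR hx.2)]]
        have h1 : (pvSq (pvRs t)).head? = some '_' := by
          rw [pvSq_head, pvRs_head t hR, ← pvSq_head t]
          exact hh
        rw [show pvSq ('_'::pvRs t) = pvSq (pvRs t) from by rw [pvSq, if_pos ⟨rfl, h1⟩]]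
        exact ih
    · rw [show pvSq (c::t) = c :: pvSq t from by rw [pvSq, if_neg hcol]]
      by_cases hS : pvSq t = []
      · have ht : t = [] := (pvSq_nil_iff t).mp hS
        subst ht
        by_cases hc : c = '_'
        · subst hc; rfl
        · rw [show pvRs [c] = [c] from by simp [pvRs, hc]]
          rw [show pvSq [c] = [c] from by
            rw [pvSq, if_neg (by rintro ⟨h1, -⟩; exact hc h1)]; rfl]
          rw [show pvSq ([] : List Char) = [] from rfl]
          simp [pvPopIf, hc]
      · have htne : t ≠ [] := fun h' => hS (by rw [h']; rfl)
        by_cases hcr : c = '_' ∧ pvRs t = []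
        · exact absurd ⟨hcr.1, by rw [pvSq_head]; exact pvRs_nil_head t htne hcr.2⟩ hcol
        · rw [show pvRs (c::t) = c :: pvRs t from by rw [pvRs, if_neg hcr]]
          have hno : ¬ (c = '_' ∧ (pvSq (pvRs t)).head? = some '_') := by
            rintro ⟨rfl, hh⟩
            by_cases hR : pvRs t = []
            · rw [hR] at hh; simp [pvSq] at hh
            · rw [pvSq_head, pvRs_head t hR, ← pvSq_head t] at hh
              exact hcol ⟨rfl, hh⟩
          rw [show pvSq (c::pvRs t) = c :: pvSq (pvRs t) from by rw [pvSq, if_neg hno]]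
          rw [← ih]
          exact pvPopIf_cons c hS

theorem pvMain (t : List Char) : pvCleanA t = pvStemB t := by
  show pvCollapseA (PySem.Chars.stripChars
      (PySem.Chars.replace
        (PySem.Chars.join [] ((PySem.Chars.lower t).map (fun c => if PySem.Chars.isalnum c || c == ' ' then [c] else [])))
        [' '] ['_']) ['_']) = pvStemB t
  rw [pvJoin_filter, pvReplace_single, pvStrip_eq, pvCollapseA_eq_sq]
  show _ = pvPopIf (pvOutB t)
  rw [show pvOutB t = List.foldl pvSstep []
      (((PySem.Chars.lower t).filter pvP).map (fun c => if c = ' ' then '_' else c)) from pvBfold _ []]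
  rw [pvFold1, pvPop_sq]

-- ===== VERDICT (by name: the statement is the Claim_ definition above) =====
theorem get_poster_filename_py_spec : Claim_equal_get_poster_filename_py := by
  intro title year _
  unfold Spec_get_poster_filename_py
  by_cases ht : title.toList = []
  · simp [get_poster_filename_py, get_poster_filename_py_alt, ht]
  · cases year with
    | none =>
      simp only [get_poster_filename_py, get_poster_filename_py_alt, if_neg ht, pvMain]
    | some y =>
      simp only [get_poster_filename_py, get_poster_filename_py_alt, if_neg ht, pvMain]
      split_ifs with hy
      · simp [List.append_assoc]
      · rfl
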